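-- pv_equiv track=rewrite | github.com/josephwidjaja100/foobar-solutions | p9.py | conjugate
-- ===== SOURCE A (Python) =====
-- from math import factorial, pow
--
-- def conjugate(c, n):
--     res = factorial(n)
--     d = {}
--     for val in c:
--         if(not(val in d)):
--             d[val] = 1
--         else:
--             d[val] += 1
--     for a, b in d.items():
--         res //= (a**b)*factorial(b)
--     return res
-- ===== SOURCE B (Python) =====
-- from math import factorial
--
-- def conjugate(c, n):
--     res = factorial(n)
--     rest = list(c)
--     while rest:
--         v = rest[0]
--         b = rest.count(v)
--         res //= v ** b * factorial(b)
--         rest = [x for x in rest if x != v]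
--     return res
-- ===== Notes on version B (the rewrite author's own statement) =====
-- stated objective: alternative
-- what changed: B drops A's two-pass frequency-dict structure: a worklist loop repeatedly takes the first remaining value, counts its occurrences, divides by a**b*factorial(b) at once, and filters that value out, preserving A's first-occurrence group order.
import Mathlib
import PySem

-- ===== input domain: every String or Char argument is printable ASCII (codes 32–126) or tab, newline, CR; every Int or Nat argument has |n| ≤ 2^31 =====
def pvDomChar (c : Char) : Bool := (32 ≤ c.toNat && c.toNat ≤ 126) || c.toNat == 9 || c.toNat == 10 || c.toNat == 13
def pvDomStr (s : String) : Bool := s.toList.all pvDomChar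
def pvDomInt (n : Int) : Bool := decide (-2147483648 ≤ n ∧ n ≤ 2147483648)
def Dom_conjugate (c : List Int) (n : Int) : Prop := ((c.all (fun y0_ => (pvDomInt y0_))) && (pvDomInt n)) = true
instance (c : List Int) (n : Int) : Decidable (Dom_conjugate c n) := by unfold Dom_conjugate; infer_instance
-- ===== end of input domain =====

-- B replaces A's frequency-dict two-pass structure with a worklist loop (take first
-- remaining value, count it, divide, filter it out); return values proved equal on Pre_.

-- math.factorial on the admitted inputs (its Int arguments are ≥ 0 there)
def pyFactorial (n : Int) : Int := (Nat.factorial n.toNat : Int)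

-- ===== PORT A =====
def conjugate (c : List Int) (n : Int) : Int :=
  let res := pyFactorial n
  let d := c.foldl
    (fun d val =>
      if d.contains val = false then d.insert val 1
      else d.modify val 0 (fun x => x + 1))
    PySem.Dict.empty
  d.items.foldl (fun res p => PySem.Int.floordiv res (p.1 ^ p.2.toNat * pyFactorial p.2)) res

-- ===== PORT B =====
def conjAltLoop (res : Int) (rest : List Int) : Int :=
  match rest with
  | [] => res
  | v :: t =>
      let b : Nat := (v :: t).count v
      conjAltLoop (PySem.Int.floordiv res (v ^ b * (Nat.factorial b : Int))) (t.filter (fun x => x != v))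
termination_by rest.length
decreasing_by
  simp only [List.length_cons, List.length_unattach]
  exact Nat.lt_succ_of_le (le_trans (List.length_filter_le _ _) (by simp))

def conjugate_alt (c : List Int) (n : Int) : Int :=
  conjAltLoop (pyFactorial n) c

-- ===== PRECONDITION & SPEC =====
-- Pre_ excludes exactly the inputs where Python A raises: n < 0 (math.factorial
-- raises ValueError) and 0 ∈ c (the group of value 0 makes the divisor 0:
-- ZeroDivisionError). B raises the same exceptions there.
def Pre_conjugate (c : List Int) (n : Int) : Prop := 0 ≤ n ∧ ¬ (0 ∈ c)
instance (c : List Int) (n : Int) : Decidable (Pre_conjugate c n) := by unfold Pre_conjugate; infer_instance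

def pvWitness_conjugate : List Int × Int := ([1, 2, 2, -3], 5)

def Spec_conjugate (c : List Int) (n : Int) (out : Int) : Prop := out = conjugate_alt c n
instance (c : List Int) (n : Int) (out : Int) : Decidable (Spec_conjugate c n out) := by unfold Spec_conjugate; infer_instance

-- ===== CLAIM (what is proved, stated in full; the proofs are below) =====
def Claim_equal_conjugate : Prop := ∀ (c : List Int) (n : Int), Dom_conjugate c n → Pre_conjugate c n → Spec_conjugate c n (conjugate c n)

-- ===== LEMMAS AND PROOFS =====

-- folding Set.add ignores elements already in the accumulator
theorem setAdd_filter (t : List Int) : ∀ (s : PySem.Set Int) (v : Int), PySem.Set.contains s v = true →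
    List.foldl PySem.Set.add s t = List.foldl PySem.Set.add s (t.filter (fun x => x != v)) := by
  induction t with
  | nil => intro s v _; rfl
  | cons x t ih =>
      intro s v hv
      by_cases hxv : x = v
      · subst hxv
        simp only [List.filter_cons, bne_self_eq_false, Bool.false_eq_true, if_false,
          List.foldl_cons, PySem.Set.add, hv, if_true]
        exact ih s x hv
      · have hkeep : (x != v) = true := by simp [hxv]
        simp only [List.filter_cons, hkeep, if_true, List.foldl_cons]
        apply ih
        simp only [PySem.Set.add]
        split
        · exact hv
        · simp only [PySem.Set.contains, List.contains_eq_mem] at hv ⊢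
          simp only [decide_eq_true_eq] at hv ⊢
          exact List.mem_append_left _ hv

-- a head element not occurring later can be pulled out of the fold
theorem setAdd_cons_out (t : List Int) : ∀ (s : List Int) (v : Int), (∀ x ∈ t, x ≠ v) →
    List.foldl PySem.Set.add (v :: s) t = v :: List.foldl PySem.Set.add s t := by
  induction t with
  | nil => intro s v _; rfl
  | cons x t ih =>
      intro s v h
      have hxv : x ≠ v := h x (List.mem_cons_self ..)
      have hc : PySem.Set.contains (v :: s) x = PySem.Set.contains s x := by
        simp [PySem.Set.contains, List.contains_eq_mem, hxv]
      simp only [List.foldl_cons, PySem.Set.add, hc]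
      by_cases hs : PySem.Set.contains s x = true
      · simp only [hs, if_true]
        exact ih _ _ (fun y hy => h y (List.mem_cons_of_mem _ hy))
      · simp only [Bool.not_eq_true] at hs
        simp only [hs, Bool.false_eq_true, if_false]
        have hcons : v :: s ++ [x] = v :: (s ++ [x]) := rfl
        rw [hcons]
        exact ih _ _ (fun y hy => h y (List.mem_cons_of_mem _ hy))

theorem ofList_cons_filter (v : Int) (t : List Int) :
    PySem.Set.ofList (v :: t) = v :: PySem.Set.ofList (t.filter (fun x => x != v)) := by
  have h1 : PySem.Set.ofList (v :: t) = List.foldl PySem.Set.add [v] t := by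
    simp [PySem.Set.ofList, PySem.Set.add, PySem.Set.empty, PySem.Set.contains]
  have h2 : List.foldl PySem.Set.add [v] t
      = List.foldl PySem.Set.add [v] (t.filter (fun x => x != v)) :=
    setAdd_filter t [v] v (by simp [PySem.Set.contains])
  have h3 : List.foldl PySem.Set.add [v] (t.filter (fun x => x != v))
      = v :: List.foldl PySem.Set.add [] (t.filter (fun x => x != v)) := by
    apply setAdd_cons_out
    intro x hx
    have := List.of_mem_filter hx
    simpa using this
  rw [h1, h2, h3]; rfl

-- the grouped division fold over first-occurrence groups IS B's worklist loop
theorem groups_loop_aux : ∀ (N : Nat) (c : List Int), c.length ≤ N → ∀ res : Int,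
    List.foldl (fun res p => PySem.Int.floordiv res (p.1 ^ p.2.toNat * pyFactorial p.2)) res
      ((PySem.Set.ofList c).map (fun k => (k, (c.count k : Int)))) = conjAltLoop res c := by
  intro N
  induction N with
  | zero =>
      intro c hc res
      have hcnil : c = [] := List.eq_nil_of_length_eq_zero (Nat.le_zero.1 hc)
      subst hcnil
      simp [conjAltLoop, PySem.Set.ofList, PySem.Set.empty]
  | succ N ih =>
      intro c hc res
      match c with
      | [] => simp [conjAltLoop, PySem.Set.ofList, PySem.Set.empty]
      | v :: t =>
        rw [ofList_cons_filter]
        have hmap : (PySem.Set.ofList (t.filter (fun x => x != v))).map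
              (fun k => (k, (((v :: t).count k : Nat) : Int)))
            = (PySem.Set.ofList (t.filter (fun x => x != v))).map
              (fun k => (k, (((t.filter (fun x => x != v)).count k : Nat) : Int))) := by
          apply List.map_congr_left
          intro k hk
          have hkmem : k ∈ t.filter (fun x => x != v) := (PySem.Set.mem_ofList _ _).1 hk
          have hkv : k ≠ v := by simpa using List.of_mem_filter hkmem
          have h1 : (v :: t).count k = t.count k := by
            simp [Ne.symm hkv]
          have h2 : (t.filter (fun x => x != v)).count k = t.count k :=
            List.count_filter (by simp [hkv])
          rw [h1, h2]
        have hlen : (t.filter (fun x => x != v)).length ≤ N := by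
          have h1 : (t.filter (fun x => x != v)).length ≤ t.length := List.length_filter_le _ _
          simp only [List.length_cons] at hc
          omega
        simp only [List.map_cons, List.foldl_cons, hmap]
        rw [ih (t.filter (fun x => x != v)) hlen]
        conv_rhs => rw [conjAltLoop]
        congr 1

theorem groups_loop (res : Int) (c : List Int) :
    List.foldl (fun res p => PySem.Int.floordiv res (p.1 ^ p.2.toNat * pyFactorial p.2)) res
      ((PySem.Set.ofList c).map (fun k => (k, (c.count k : Int)))) = conjAltLoop res c :=
  groups_loop_aux c.length c le_rfl res

-- A's dict-building loop is collections.Counter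
theorem afold_eq_counter (c : List Int) :
    c.foldl
      (fun d val =>
        if d.contains val = false then d.insert val 1
        else d.modify val 0 (fun x => x + 1))
      PySem.Dict.empty = PySem.Dict.counter c := by
  rw [PySem.Dict.counter]
  apply List.foldl_ext
  intro d val _
  by_cases h : d.contains val = true
  · simp [h]
  · have hnone : d.get? val = none := by
      rw [PySem.Dict.contains_eq_isSome_get?] at h
      cases hq : d.get? val with
      | none => rfl
      | some w => rw [hq] at h; simp at h
    have hg : d.getD val 0 = 0 := by
      simp [PySem.Dict.getD, hnone]
    simp [h, PySem.Dict.modify, hg]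

-- ===== VERDICT (by name: the statement is the Claim_ definition above) =====
theorem conjugate_spec : Claim_equal_conjugate := by
  intro c n _ _
  show (c.foldl
      (fun d val =>
        if d.contains val = false then d.insert val 1
        else d.modify val 0 (fun x => x + 1))
      PySem.Dict.empty).items.foldl
        (fun res p => PySem.Int.floordiv res (p.1 ^ p.2.toNat * pyFactorial p.2)) (pyFactorial n)
    = conjAltLoop (pyFactorial n) c
  rw [afold_eq_counter, PySem.Dict.items_counter, groups_loop]
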